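-- pv_equiv track=rewrite | github.com/maurorusso22/ITDC-portfolio | sardinas-patterson.py | create_suffixes_set
-- ===== SOURCE A (Python) =====
-- def create_suffixes_set(c, n):
--     if n == 0:
--         # s_of_0 is always c
--         return set(c)
--
--     else:
--         s_of_n = set() # init
--         s_of_n_minus_1 = create_suffixes_set(c, n - 1)
--
--         for cw in c:
--             for cw1 in s_of_n_minus_1:
--                 if (len(cw) > len(cw1)) and cw.find(cw1) == 0:
--                     # if cw starts with cw1
--                     # then add the suffix to s_of_n
--                     suffix = cw[ len(cw1) : ]
--                     s_of_n.add(suffix)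
--
--         # same thing but reversed
--         for cw1 in s_of_n_minus_1:
--             for cw in c:
--                 if len(cw1) > len(cw) and cw1.find(cw) == 0:
--                     suffix = cw1[ len(cw) : ]
--                     s_of_n.add(suffix)
--
--         return s_of_n
-- ===== SOURCE B (Python) =====
-- def create_suffixes_set(c, n):
--     # Iterative version: start from S_0 = set(c) and apply n level-steps,
--     # each built from two set comprehensions (the two prefix directions).
--     current = set(c)
--     steps = n
--     while steps > 0:
--         first = {cw[len(cw1):] for cw in c for cw1 in current
--                  if len(cw) > len(cw1) and cw.startswith(cw1)}
--         second = {cw1[len(cw):] for cw1 in current for cw in c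
--                   if len(cw1) > len(cw) and cw1.startswith(cw)}
--         current = first | second
--         steps -= 1
--     return current
-- ===== Notes on version B (the rewrite author's own statement) =====
-- stated objective: simpler
-- what changed: Replaces the recursion on n by an iterative loop that keeps only the previous level's set, and the two explicit nested add-loops by two set comprehensions united per step.
import Mathlib
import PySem

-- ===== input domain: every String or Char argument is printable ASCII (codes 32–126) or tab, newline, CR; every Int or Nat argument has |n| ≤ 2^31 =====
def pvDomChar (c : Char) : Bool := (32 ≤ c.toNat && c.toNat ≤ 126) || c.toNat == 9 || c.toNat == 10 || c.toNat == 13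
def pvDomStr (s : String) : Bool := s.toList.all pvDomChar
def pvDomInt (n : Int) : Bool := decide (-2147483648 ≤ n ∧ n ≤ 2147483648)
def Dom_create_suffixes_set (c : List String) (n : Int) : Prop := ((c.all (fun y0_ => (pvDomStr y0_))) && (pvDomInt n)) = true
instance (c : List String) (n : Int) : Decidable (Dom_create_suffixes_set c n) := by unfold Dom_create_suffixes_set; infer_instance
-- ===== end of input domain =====

-- B replaces A's recursion on n by an iterative loop keeping only the previous level's
-- set, with the step written as two set comprehensions united (objective: simpler).

-- ===== PORT A =====
-- the recursion of A, on the Nat value of n (Python's n == 0 test is the base case;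
-- for n < 0 the Python recursion never reaches 0 and raises RecursionError — outside Pre_)
def create_suffixes_set_go (c : List String) : Nat → List String
  | 0 => PySem.Set.ofList c
  | m+1 =>
    let s_of_n_minus_1 := create_suffixes_set_go c m
    -- for cw in c: for cw1 in s_of_n_minus_1: if len(cw) > len(cw1) and cw.find(cw1) == 0: add cw[len(cw1):]
    let s_of_n : List String := c.foldl (fun s cw =>
      s_of_n_minus_1.foldl (fun s cw1 =>
        if (decide (PySem.Str.len cw1 < PySem.Str.len cw)) && (PySem.Str.find cw cw1 == 0)
        then PySem.Set.add s (PySem.Str.slice cw (some (PySem.Str.len cw1 : Int)) none)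
        else s) s) PySem.Set.empty
    -- same thing but reversed
    s_of_n_minus_1.foldl (fun s cw1 =>
      c.foldl (fun s cw =>
        if (decide (PySem.Str.len cw < PySem.Str.len cw1)) && (PySem.Str.find cw1 cw == 0)
        then PySem.Set.add s (PySem.Str.slice cw1 (some (PySem.Str.len cw : Int)) none)
        else s) s) s_of_n

def create_suffixes_set (c : List String) (n : Int) : List String :=
  create_suffixes_set_go c n.toNat

-- ===== PORT B =====
-- one level-step: two set comprehensions, united
def alt_step (c : List String) (current : List String) : List String :=
  let first := PySem.Set.ofList (c.flatMap (fun cw =>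
    (current.filter (fun cw1 =>
        (decide (PySem.Str.len cw1 < PySem.Str.len cw)) && PySem.Str.startswith cw cw1)).map
      (fun cw1 => PySem.Str.slice cw (some (PySem.Str.len cw1 : Int)) none)))
  let second := PySem.Set.ofList (current.flatMap (fun cw1 =>
    (c.filter (fun cw =>
        (decide (PySem.Str.len cw < PySem.Str.len cw1)) && PySem.Str.startswith cw1 cw)).map
      (fun cw => PySem.Str.slice cw1 (some (PySem.Str.len cw : Int)) none)))
  PySem.Set.union first second

-- 'while steps > 0': the loop runs n.toNat times (not at all for n ≤ 0)
def alt_go (c : List String) : Nat → List String → List String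
  | 0, current => current
  | m+1, current => alt_go c m (alt_step c current)

def create_suffixes_set_alt (c : List String) (n : Int) : List String :=
  alt_go c n.toNat (PySem.Set.ofList c)

-- ===== PRECONDITION & SPEC =====
-- For n < 0 the Python A recurses without reaching the base case and raises RecursionError.
def Pre_create_suffixes_set (c : List String) (n : Int) : Prop := 0 ≤ n
instance (c : List String) (n : Int) : Decidable (Pre_create_suffixes_set c n) := by unfold Pre_create_suffixes_set; infer_instance
def pvWitness_create_suffixes_set : List String × Int := (["ab", "a", "b"], 2)

def Spec_create_suffixes_set (c : List String) (n : Int) (out : List String) : Prop := out = create_suffixes_set_alt c n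
instance (c : List String) (n : Int) (out : List String) : Decidable (Spec_create_suffixes_set c n out) := by unfold Spec_create_suffixes_set; infer_instance

-- ===== CLAIM (what is proved, stated in full; the proofs are below) =====
def Claim_equal_create_suffixes_set : Prop := ∀ (c : List String) (n : Int), Dom_create_suffixes_set c n → Pre_create_suffixes_set c n → Spec_create_suffixes_set c n (create_suffixes_set c n)

-- ===== LEMMAS AND PROOFS =====

-- s.find(p) == 0 is exactly s.startswith(p)
theorem find_eq_zero_eq_startswith (s p : String) :
    (PySem.Str.find s p == 0) = PySem.Str.startswith s p := by
  simp only [PySem.Str.find_eq, PySem.Str.startswith_eq]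
  have key : PySem.Chars.find s.toList p.toList = 0 ↔ p.toList <+: s.toList := by
    constructor
    · intro h0
      have h1 := (PySem.Chars.find_spec (s := s.toList) (sub := p.toList) (by rw [h0])).1
      rw [h0] at h1
      simpa using h1
    · intro hp
      have hnn := (PySem.Chars.find_nonneg_iff s.toList p.toList).mpr hp.isInfix
      have hspec := PySem.Chars.find_spec (s := s.toList) (sub := p.toList) hnn
      by_contra hne
      exact hspec.2 0 (by omega) (by simpa using hp)
  rw [Bool.eq_iff_iff]
  simp [key, PySem.Chars.startswith_iff]

-- folding Set.update over a list is one Set.update of the flatMap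
theorem foldl_update_eq_update_flatMap (g : String → List String) :
    ∀ (l : List String) (s : PySem.Set String),
      l.foldl (fun s x => PySem.Set.update s (g x)) s = PySem.Set.update s (l.flatMap g) := by
  intro l
  induction l with
  | nil => intro s; simp [PySem.Set.update]
  | cons a t ih =>
    intro s
    simp only [List.foldl_cons, List.flatMap_cons, ih, PySem.Set.update_append]

-- a conditional-add loop is a Set.update with the filtered, mapped stream
theorem foldl_cond_add_eq_update (p : String → Bool) (f : String → String)
    (l : List String) (s : PySem.Set String) :
    l.foldl (fun s x => if p x then PySem.Set.add s (f x) else s) s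
      = PySem.Set.update s ((l.filter p).map f) := by
  rw [PySem.List.foldl_if_eq_foldl_filter, ← PySem.Set.update_map_eq_foldl_add]

-- updating with a deduplicated list is updating with the list
theorem update_ofList (s : PySem.Set String) (l : List String) :
    PySem.Set.update s (PySem.Set.ofList l) = PySem.Set.update s l := by
  rw [PySem.Set.update_eq_append_filter, PySem.Set.update_eq_append_filter,
    PySem.Set.ofList_ofList]

-- one recursion level of A's port equals one loop step of B's port
theorem step_eq (c prev : List String) :
    (prev.foldl (fun s cw1 =>
      c.foldl (fun s cw =>
        if (decide (PySem.Str.len cw < PySem.Str.len cw1)) && (PySem.Str.find cw1 cw == 0)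
        then PySem.Set.add s (PySem.Str.slice cw1 (some (PySem.Str.len cw : Int)) none)
        else s) s)
      (c.foldl (fun s cw =>
        prev.foldl (fun s cw1 =>
          if (decide (PySem.Str.len cw1 < PySem.Str.len cw)) && (PySem.Str.find cw cw1 == 0)
          then PySem.Set.add s (PySem.Str.slice cw (some (PySem.Str.len cw1 : Int)) none)
          else s) s) PySem.Set.empty))
    = alt_step c prev := by
  have hcond : ∀ a b : String,
      ((decide (PySem.Str.len b < PySem.Str.len a)) && (PySem.Str.find a b == 0))
        = ((decide (PySem.Str.len b < PySem.Str.len a)) && PySem.Str.startswith a b) := by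
    intro a b; rw [find_eq_zero_eq_startswith]
  have inner1 : ∀ (s : PySem.Set String) (cw : String), prev.foldl (fun s cw1 =>
      if (decide (PySem.Str.len cw1 < PySem.Str.len cw)) && (PySem.Str.find cw cw1 == 0)
      then PySem.Set.add s (PySem.Str.slice cw (some (PySem.Str.len cw1 : Int)) none)
      else s) s
      = PySem.Set.update s ((prev.filter (fun cw1 =>
          (decide (PySem.Str.len cw1 < PySem.Str.len cw)) && PySem.Str.startswith cw cw1)).map
            (fun cw1 => PySem.Str.slice cw (some (PySem.Str.len cw1 : Int)) none)) := by
    intro s cw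
    rw [foldl_cond_add_eq_update]
    congr 1
    refine congrArg _ (List.filter_congr ?_)
    intro x _; exact hcond cw x
  have inner2 : ∀ (s : PySem.Set String) (cw1 : String), c.foldl (fun s cw =>
      if (decide (PySem.Str.len cw < PySem.Str.len cw1)) && (PySem.Str.find cw1 cw == 0)
      then PySem.Set.add s (PySem.Str.slice cw1 (some (PySem.Str.len cw : Int)) none)
      else s) s
      = PySem.Set.update s ((c.filter (fun cw =>
          (decide (PySem.Str.len cw < PySem.Str.len cw1)) && PySem.Str.startswith cw1 cw)).map
            (fun cw => PySem.Str.slice cw1 (some (PySem.Str.len cw : Int)) none)) := by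
    intro s cw1
    rw [foldl_cond_add_eq_update]
    congr 1
    refine congrArg _ (List.filter_congr ?_)
    intro x _; exact hcond cw1 x
  rw [PySem.List.foldl_congr_mem (l := c) (init := (PySem.Set.empty : PySem.Set String))
        (h := fun acc x _ => inner1 acc x),
      PySem.List.foldl_congr_mem (l := prev)
        (h := fun acc x _ => inner2 acc x),
      foldl_update_eq_update_flatMap, foldl_update_eq_update_flatMap]
  simp only [alt_step]
  rw [show (PySem.Set.empty : PySem.Set String) = [] from rfl, PySem.Set.update_nil_left,
      show ∀ (s t : PySem.Set String), PySem.Set.union s t = PySem.Set.update s t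
        from fun _ _ => rfl,
      update_ofList]

theorem alt_go_step_comm (c : List String) :
    ∀ (m : Nat) (x : List String), alt_go c m (alt_step c x) = alt_step c (alt_go c m x) := by
  intro m
  induction m with
  | zero => intro x; rfl
  | succ k ih => intro x; simpa [alt_go] using ih (alt_step c x)

theorem go_eq_alt_go (c : List String) :
    ∀ m : Nat, create_suffixes_set_go c m = alt_go c m (PySem.Set.ofList c) := by
  intro m
  induction m with
  | zero => rfl
  | succ k ih =>
    show (((create_suffixes_set_go c k)).foldl _ _) = _
    rw [step_eq c (create_suffixes_set_go c k), ih, alt_go, ← alt_go_step_comm]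

-- ===== VERDICT (by name: the statement is the Claim_ definition above) =====
theorem create_suffixes_set_spec : Claim_equal_create_suffixes_set := by
  intro c n _ _
  show create_suffixes_set c n = create_suffixes_set_alt c n
  unfold create_suffixes_set create_suffixes_set_alt
  exact go_eq_alt_go c n.toNat
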